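-- pv_equiv track=rewrite | github.com/UncleK/agentschat | app/tool/migrate_localized_text_to_arb.py | consume_braced_interpolation
-- ===== SOURCE A (Python) =====
-- def consume_braced_interpolation(body: str, start_index: int) -> tuple[str, int]:
--     depth = 1
--     index = start_index
--     in_string: str | None = None
--     escape = False
--     parts: list[str] = []
--
--     while index < len(body):
--         char = body[index]
--         if in_string:
--             parts.append(char)
--             if escape:
--                 escape = False
--             elif char == "\\":
--                 escape = True
--             elif char == in_string:
--                 in_string = None
--             index += 1
--             continue
--
--         if char in {"'", '"'}:
--             in_string = char
--             parts.append(char)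
--             index += 1
--             continue
--         if char == "{":
--             depth += 1
--             parts.append(char)
--             index += 1
--             continue
--         if char == "}":
--             depth -= 1
--             if depth == 0:
--                 return "".join(parts).strip(), index + 1
--             parts.append(char)
--             index += 1
--             continue
--
--         parts.append(char)
--         index += 1
--
--     raise ValueError("Unclosed interpolation expression")
-- ===== SOURCE B (Python) =====
-- def consume_braced_interpolation(body: str, start_index: int) -> tuple[str, int]:
--     depth = 1
--     index = start_index
--     parts: list[str] = []
--     n = len(body)
--     while index < n:
--         char = body[index]
--         index += 1
--         if char in ("'", '"'):
--             parts.append(char)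
--             escape = False
--             closed = False
--             while index < n:
--                 c = body[index]
--                 index += 1
--                 parts.append(c)
--                 if escape:
--                     escape = False
--                 elif c == "\\":
--                     escape = True
--                 elif c == char:
--                     closed = True
--                     break
--             if not closed:
--                 raise ValueError("Unclosed interpolation expression")
--         elif char == "{":
--             depth += 1
--             parts.append(char)
--         elif char == "}":
--             depth -= 1
--             if depth == 0:
--                 return "".join(parts).strip(), index
--             parts.append(char)
--         else:
--             parts.append(char)
--     raise ValueError("Unclosed interpolation expression")
-- ===== Notes on version B (the rewrite author's own statement) =====
-- stated objective: simpler
-- what changed: A's single flat loop carrying in_string/escape mode flags is replaced by an outer loop over braces that delegates each quoted string literal to a dedicated inner consuming loop, so the brace logic and the string-literal logic are separate loops with no mode flags across iterations.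
import Mathlib
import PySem

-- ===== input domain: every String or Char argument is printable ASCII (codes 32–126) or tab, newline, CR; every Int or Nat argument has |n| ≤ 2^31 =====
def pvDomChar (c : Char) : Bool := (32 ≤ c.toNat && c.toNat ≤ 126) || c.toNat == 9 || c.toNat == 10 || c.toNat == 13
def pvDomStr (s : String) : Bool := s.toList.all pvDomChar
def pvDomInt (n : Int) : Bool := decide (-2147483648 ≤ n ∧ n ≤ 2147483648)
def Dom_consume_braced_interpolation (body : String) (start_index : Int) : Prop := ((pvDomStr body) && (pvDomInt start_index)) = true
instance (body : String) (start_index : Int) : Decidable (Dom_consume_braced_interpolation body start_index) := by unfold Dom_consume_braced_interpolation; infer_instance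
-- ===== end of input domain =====

-- B replaces A's single flat loop with four mode flags by an outer brace loop that delegates each
-- string literal to a dedicated inner loop (objective: simpler control flow, same cost).

-- ===== PORT A =====
-- A's single while loop; fuel k = (len - index).toNat mirrors 'while index < len(body)'
-- exactly (k = 0 ↔ index ≥ len); 'none' = the Python raises (ValueError at exhaustion,
-- IndexError from body[index] when index < -len).
def pvLoopA (chars : List Char) (k : Nat) (index depth : Int) (instr : Option Char)
    (escape : Bool) (parts : List Char) : Option (String × Int) :=
  match k with
  | 0 => none
  | k + 1 =>
    match PySem.List.pyGet? chars index with
    | none => none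
    | some c =>
      match instr with
      | some q =>
        let parts := parts ++ [c]
        if escape then pvLoopA chars k (index + 1) depth (some q) false parts
        else if c = '\\' then pvLoopA chars k (index + 1) depth (some q) true parts
        else if c = q then pvLoopA chars k (index + 1) depth none false parts
        else pvLoopA chars k (index + 1) depth (some q) false parts
      | none =>
        if c = '\'' ∨ c = '"' then
          pvLoopA chars k (index + 1) depth (some c) false (parts ++ [c])
        else if c = '{' then
          pvLoopA chars k (index + 1) (depth + 1) none false (parts ++ [c])
        else if c = '}' then
          if depth - 1 = 0 then some (PySem.Str.strip (String.mk parts), index + 1)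
          else pvLoopA chars k (index + 1) (depth - 1) none false (parts ++ [c])
        else pvLoopA chars k (index + 1) depth none false (parts ++ [c])

def consume_braced_interpolation (body : String) (start_index : Int) : String × Int :=
  ((pvLoopA body.toList ((body.toList.length : Int) - start_index).toNat start_index 1
      none false []).getD ("", 0))

-- ===== PORT B =====
-- B's inner loop: consume one string literal opened by quote q; returns the leftover fuel,
-- the next index and the accumulated parts ('none' = loop exhausted ⇒ ValueError).
def pvStrB (chars : List Char) (k : Nat) (index : Int) (q : Char) (escape : Bool)
    (parts : List Char) : Option (Nat × Int × List Char) :=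
  match k with
  | 0 => none
  | k + 1 =>
    match PySem.List.pyGet? chars index with
    | none => none
    | some c =>
      let parts := parts ++ [c]
      if escape then pvStrB chars k (index + 1) q false parts
      else if c = '\\' then pvStrB chars k (index + 1) q true parts
      else if c = q then some (k, index + 1, parts)
      else pvStrB chars k (index + 1) q false parts

theorem pvStrB_fuel_le (chars : List Char) (k : Nat) (index : Int) (q : Char) (escape : Bool)
    (parts : List Char) (k' : Nat) (i' : Int) (p' : List Char)
    (h : pvStrB chars k index q escape parts = some (k', i', p')) : k' ≤ k := by
  induction k generalizing index escape parts with
  | zero => simp [pvStrB] at h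
  | succ k ih =>
    rw [pvStrB] at h
    cases hg : PySem.List.pyGet? chars index with
    | none => rw [hg] at h; simp at h
    | some c =>
      rw [hg] at h
      simp only at h
      split_ifs at h with h1 h2 h3
      · exact Nat.le_succ_of_le (ih _ _ _ h)
      · exact Nat.le_succ_of_le (ih _ _ _ h)
      · simp at h; omega
      · exact Nat.le_succ_of_le (ih _ _ _ h)

-- B's outer loop over braces.
def pvLoopB (chars : List Char) (k : Nat) (index depth : Int) (parts : List Char) :
    Option (String × Int) :=
  match k with
  | 0 => none
  | k + 1 =>
    match PySem.List.pyGet? chars index with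
    | none => none
    | some c =>
      if c = '\'' ∨ c = '"' then
        match h : pvStrB chars k (index + 1) c false (parts ++ [c]) with
        | none => none
        | some (k', i', p') => pvLoopB chars k' i' depth p'
      else if c = '{' then pvLoopB chars k (index + 1) (depth + 1) (parts ++ [c])
      else if c = '}' then
        if depth - 1 = 0 then some (PySem.Str.strip (String.mk parts), index + 1)
        else pvLoopB chars k (index + 1) (depth - 1) (parts ++ [c])
      else pvLoopB chars k (index + 1) depth (parts ++ [c])
  termination_by k
  decreasing_by
  · exact Nat.lt_succ_of_le (pvStrB_fuel_le _ _ _ _ _ _ _ _ _ h)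
  all_goals exact Nat.lt_succ_self k

def consume_braced_interpolation_alt (body : String) (start_index : Int) : String × Int :=
  ((pvLoopB body.toList ((body.toList.length : Int) - start_index).toNat start_index 1
      []).getD ("", 0))

-- ===== PRECONDITION & SPEC =====
-- Pre_: the interpolation expression is well-closed — in the character sequence Python actually
-- reads (the suffix from start_index, preceded-by-wrap when start_index is negative, empty/invalid
-- otherwise), braces balance to the matching '}' outside quoted string literals. Outside this A
-- raises (ValueError "Unclosed interpolation expression", or IndexError when start_index < -len(body)).
def pvWellClosed : List Char → Int → Option Char → Bool → Bool
  | [], _, _, _ => false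
  | c :: rest, depth, some q, escape =>
    if escape then pvWellClosed rest depth (some q) false
    else if c = '\\' then pvWellClosed rest depth (some q) true
    else if c = q then pvWellClosed rest depth none false
    else pvWellClosed rest depth (some q) false
  | c :: rest, depth, none, _ =>
    if c = '\'' ∨ c = '"' then pvWellClosed rest depth (some c) false
    else if c = '{' then pvWellClosed rest (depth + 1) none false
    else if c = '}' then
      if depth - 1 = 0 then true else pvWellClosed rest (depth - 1) none false
    else pvWellClosed rest depth none false

def Pre_consume_braced_interpolation (body : String) (start_index : Int) : Prop :=
  (if 0 ≤ start_index then
      pvWellClosed (body.toList.drop start_index.toNat) 1 none false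
    else if -(body.toList.length : Int) ≤ start_index then
      pvWellClosed (body.toList.drop ((body.toList.length : Int) + start_index).toNat
        ++ body.toList) 1 none false
    else false) = true
instance (body : String) (start_index : Int) :
    Decidable (Pre_consume_braced_interpolation body start_index) := by
  unfold Pre_consume_braced_interpolation; infer_instance

def pvWitness_consume_braced_interpolation : String × Int := ("a + b}", 0)

def Spec_consume_braced_interpolation (body : String) (start_index : Int) (out : String × Int) : Prop := out = consume_braced_interpolation_alt body start_index
instance (body : String) (start_index : Int) (out : String × Int) : Decidable (Spec_consume_braced_interpolation body start_index out) := by unfold Spec_consume_braced_interpolation; infer_instance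

-- ===== CLAIM (what is proved, stated in full; the proofs are below) =====
def Claim_equal_consume_braced_interpolation : Prop := ∀ (body : String) (start_index : Int), Dom_consume_braced_interpolation body start_index → Pre_consume_braced_interpolation body start_index → Spec_consume_braced_interpolation body start_index (consume_braced_interpolation body start_index)

-- ===== LEMMAS AND PROOFS =====

-- A's in-string phase computes exactly B's inner loop followed by the rest of A's loop.
theorem pvLoopA_string (chars : List Char) (k : Nat) (index depth : Int) (q : Char)
    (escape : Bool) (parts : List Char) :
    pvLoopA chars k index depth (some q) escape parts =
      match pvStrB chars k index q escape parts with
      | none => none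
      | some (k', i', p') => pvLoopA chars k' i' depth none false p' := by
  induction k generalizing index escape parts with
  | zero => simp [pvLoopA, pvStrB]
  | succ k ih =>
    rw [pvLoopA, pvStrB]
    cases hg : PySem.List.pyGet? chars index with
    | none => simp
    | some c =>
      simp only
      split_ifs with h1 h2 h3
      · exact ih _ _ _
      · exact ih _ _ _
      · simp
      · exact ih _ _ _

theorem pvLoopA_eq_pvLoopB (chars : List Char) (k : Nat) (index depth : Int)
    (parts : List Char) :
    pvLoopA chars k index depth none false parts = pvLoopB chars k index depth parts := by
  induction k using Nat.strong_induction_on generalizing index depth parts with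
  | _ k ih =>
    match k with
    | 0 => simp [pvLoopA, pvLoopB]
    | k + 1 =>
      rw [pvLoopA, pvLoopB]
      cases hg : PySem.List.pyGet? chars index with
      | none => simp
      | some c =>
        simp only
        split_ifs with h1 h2 h3
        · rw [pvLoopA_string]
          cases hs : pvStrB chars k (index + 1) c false (parts ++ [c]) with
          | none => rfl
          | some t =>
            obtain ⟨k', i', p'⟩ := t
            exact ih k' (Nat.lt_succ_of_le (pvStrB_fuel_le _ _ _ _ _ _ _ _ _ hs)) _ _ _
        · exact ih k (Nat.lt_succ_self k) _ _ _
        · rfl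
        · exact ih k (Nat.lt_succ_self k) _ _ _
        · exact ih k (Nat.lt_succ_self k) _ _ _

-- ===== VERDICT (by name: the statement is the Claim_ definition above) =====
theorem consume_braced_interpolation_spec : Claim_equal_consume_braced_interpolation := by
  intro body start_index _ _
  unfold Spec_consume_braced_interpolation consume_braced_interpolation
    consume_braced_interpolation_alt
  rw [pvLoopA_eq_pvLoopB]
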